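-- pv_equiv track=rewrite | github.com/Booklover4eva/KIT_Masterthesis_Xenia_Schneider | Masterthesis_ReaDDy/Nanomotif_Phase_Sep/python_scripts/.ipynb_checkpoints/NCG_readdy_sim_eval_2-checkpoint.py | vertices_n_edges_away
-- ===== SOURCE A (Python) =====
-- from collections import defaultdict, deque
--
-- def vertices_n_edges_away(edges, start_vertex,number_edges):
--     # Create an adjacency list for the graph
--     adjacency_list = defaultdict(list)
--
--     for edge in edges:
--         adjacency_list[edge[0]].append(edge[1])
--         adjacency_list[edge[1]].append(edge[0])
--
--     # Perform BFS to find vertices that are exactly three edges away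
--     queue = deque([(start_vertex, 0)])
--     visited = set([start_vertex])
--     result = []
--
--     while queue:
--         current_vertex, distance = queue.popleft()
--
--         if distance == number_edges:
--             result.append(current_vertex)
--
--         if distance < number_edges:
--             for neighbor in adjacency_list[current_vertex]:
--                 if neighbor not in visited:
--                     visited.add(neighbor)
--                     queue.append((neighbor, distance + 1))
--
--     return result
-- ===== SOURCE B (Python) =====
-- def vertices_n_edges_away(edges, start_vertex, number_edges):
--     if number_edges < 0:
--         return []
--     levels = [[start_vertex]]
--     while len(levels) <= number_edges and levels[-1]:
--         seen = [u for lvl in levels for u in lvl]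
--         cur = []
--         for v in levels[-1]:
--             for a, b in edges:
--                 if a == v and b not in seen and b not in cur:
--                     cur.append(b)
--                 if b == v and a not in seen and a not in cur:
--                     cur.append(a)
--         levels.append(cur)
--     return levels[-1]
-- ===== Notes on version B (the rewrite author's own statement) =====
-- stated objective: alternative
-- what changed: Drops A's adjacency dict, deque of (vertex, distance) pairs and mutable visited set entirely: B keeps a list of BFS levels, finds each frontier vertex's neighbours by rescanning the raw edge list, and tests 'already seen' by membership in the concatenation of the levels; the last level is the answer.
import Mathlib
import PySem

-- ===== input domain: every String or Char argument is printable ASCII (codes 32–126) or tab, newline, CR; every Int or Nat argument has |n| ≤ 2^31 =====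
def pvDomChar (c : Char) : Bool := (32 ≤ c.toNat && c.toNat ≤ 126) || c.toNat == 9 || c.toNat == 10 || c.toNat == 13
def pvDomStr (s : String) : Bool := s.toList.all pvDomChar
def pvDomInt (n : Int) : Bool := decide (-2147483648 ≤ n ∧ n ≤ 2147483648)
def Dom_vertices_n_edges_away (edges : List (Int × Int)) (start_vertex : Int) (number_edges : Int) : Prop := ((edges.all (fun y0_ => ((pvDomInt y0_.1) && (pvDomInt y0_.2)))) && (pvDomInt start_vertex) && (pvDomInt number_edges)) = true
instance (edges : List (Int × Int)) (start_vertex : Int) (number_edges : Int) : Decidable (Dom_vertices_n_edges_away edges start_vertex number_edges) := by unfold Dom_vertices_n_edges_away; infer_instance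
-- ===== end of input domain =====

-- B drops A's adjacency dict, deque and visited set: it keeps a list of BFS levels, finds each
-- frontier vertex's neighbours by rescanning the raw edge list, and tests 'seen' by membership
-- in the concatenated levels (alternative decomposition; same return value).


-- ===== PORT A =====
-- adjacency_list = defaultdict(list); d[k].append(x) is Dict.modify k [] (· ++ [x]) (the implicit
-- insertion of [] on a defaultdict read never changes any getD value, so getD models the reads exactly)
def pvAdjA (edges : List (Int × Int)) : PySem.Dict Int (List Int) :=
  edges.foldl (fun d e =>
    (d.modify e.1 [] (fun l => l ++ [e.2])).modify e.2 [] (fun l => l ++ [e.1]))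
    PySem.Dict.empty

-- A's while-loop over the deque; fuel only makes the loop total: each iteration pops one element and
-- at most 1 + 2*|edges| elements are ever enqueued (each push marks a fresh vertex as visited)
def pvALoop (adj : PySem.Dict Int (List Int)) (n : Int) :
    Nat → List (Int × Int) → PySem.Set Int → List Int → List Int
  | 0, _, _, res => res
  | _+1, [], _, res => res
  | fuel+1, (v, d) :: q, vis, res =>
    let res' := if d = n then res ++ [v] else res
    if d < n then
      let st := (adj.getD v []).foldl
        (fun (p : List (Int × Int) × PySem.Set Int) nb =>
          if nb ∈ p.2 then p else (p.1 ++ [(nb, d + 1)], PySem.Set.add p.2 nb))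
        (q, vis)
      pvALoop adj n fuel st.1 st.2 res'
    else pvALoop adj n fuel q vis res'

def vertices_n_edges_away (edges : List (Int × Int)) (start_vertex : Int) (number_edges : Int) : List Int :=
  let adj := pvAdjA edges
  pvALoop adj number_edges (2 * edges.length + 1) [(start_vertex, 0)]
    (PySem.Set.ofList [start_vertex]) []

-- ===== PORT B =====
-- B's inner edge scan for one frontier vertex v: 'for a, b in edges: if a == v and … / if b == v and …'
def pvScan (edges : List (Int × Int)) (seen : List Int) (cur : List Int) (v : Int) : List Int :=
  edges.foldl (fun cur e =>
    let cur := if e.1 = v ∧ e.2 ∉ seen ∧ e.2 ∉ cur then cur ++ [e.2] else cur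
    if e.2 = v ∧ e.1 ∉ seen ∧ e.1 ∉ cur then cur ++ [e.1] else cur) cur

-- B's while loop: 'while len(levels) <= number_edges and levels[-1]'. The fuel r only makes it
-- total: r = number_edges + 1 - len(levels) counts the remaining iterations exactly, so r = 0
-- is exactly the loop condition 'len(levels) > number_edges'.
def pvWhileB (edges : List (Int × Int)) : Nat → List (List Int) → List (List Int)
  | 0, levels => levels
  | r+1, levels =>
    if levels.getLastD [] = [] then levels
    else
      let seen := levels.flatMap id
      let cur := (levels.getLastD []).foldl (pvScan edges seen) []
      pvWhileB edges r (levels ++ [cur])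

def vertices_n_edges_away_alt (edges : List (Int × Int)) (start_vertex : Int) (number_edges : Int) : List Int :=
  if number_edges < 0 then []
  else (pvWhileB edges number_edges.toNat [[start_vertex]]).getLastD []

-- ===== PRECONDITION & SPEC =====
def Spec_vertices_n_edges_away (edges : List (Int × Int)) (start_vertex : Int) (number_edges : Int) (out : List Int) : Prop := out = vertices_n_edges_away_alt edges start_vertex number_edges
instance (edges : List (Int × Int)) (start_vertex : Int) (number_edges : Int) (out : List Int) : Decidable (Spec_vertices_n_edges_away edges start_vertex number_edges out) := by unfold Spec_vertices_n_edges_away; infer_instance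

-- ===== CLAIM (what is proved, stated in full; the proofs are below) =====
def Claim_equal_vertices_n_edges_away : Prop := ∀ (edges : List (Int × Int)) (start_vertex : Int) (number_edges : Int), Dom_vertices_n_edges_away edges start_vertex number_edges → Spec_vertices_n_edges_away edges start_vertex number_edges (vertices_n_edges_away edges start_vertex number_edges)

-- ===== LEMMAS AND PROOFS =====

-- Proof-only intermediate form: the level-synchronous frontier loop over the adjacency dict.
-- A's queue is proved equal to it (pvALoop_main), and B's levels list is proved equal to it too
-- (pvWhileB_eq); neither port is defined through it.
def pvStep (adj : PySem.Dict Int (List Int)) (p : List Int × PySem.Set Int) (v : Int) :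
    List Int × PySem.Set Int :=
  (adj.getD v []).foldl
    (fun p w => if w ∈ p.2 then p else (p.1 ++ [w], PySem.Set.add p.2 w)) p

def pvLevels (adj : PySem.Dict Int (List Int)) :
    Nat → List Int → PySem.Set Int → List Int
  | 0, fr, _ => fr
  | k+1, fr, vis =>
    if fr = [] then fr
    else
      let st := fr.foldl (pvStep adj) ([], vis)
      pvLevels adj k st.1 st.2

-- all vertices of the graph plus the start vertex: every visited vertex lies in here
def pvV (edges : List (Int × Int)) (s : Int) : List Int :=
  s :: edges.flatMap (fun e => [e.1, e.2])

lemma pvV_length (edges : List (Int × Int)) (s : Int) :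
    (pvV edges s).length = 2 * edges.length + 1 := by
  simp only [pvV, List.length_cons, List.length_flatMap]
  induction edges with
  | nil => rfl
  | cons e es ih => simp at ih ⊢; omega

lemma pvAdjA_mem (edges : List (Int × Int)) :
    ∀ (d : PySem.Dict Int (List Int)) (v w : Int),
      w ∈ (edges.foldl (fun d e =>
        (d.modify e.1 [] (fun l => l ++ [e.2])).modify e.2 [] (fun l => l ++ [e.1])) d).getD v [] →
      w ∈ d.getD v [] ∨ ∃ e ∈ edges, w = e.1 ∨ w = e.2 := by
  induction edges with
  | nil => intro d v w h; exact Or.inl h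
  | cons e es ih =>
    intro d v w h
    rw [List.foldl_cons] at h
    rcases ih _ v w h with h' | ⟨e', he', hw⟩
    · simp only [PySem.Dict.getD_modify] at h'
      split_ifs at h' with h1 h2 h3
      · simp only [List.mem_append, List.mem_singleton] at h'
        rcases h' with (h' | rfl) | rfl
        · exact Or.inl (by rw [h1, h2]; exact h')
        · exact Or.inr ⟨e, List.mem_cons_self .., Or.inr rfl⟩
        · exact Or.inr ⟨e, List.mem_cons_self .., Or.inl rfl⟩
      · simp only [List.mem_append, List.mem_singleton] at h'
        rcases h' with h' | rfl
        · exact Or.inl (by rw [h1]; exact h')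
        · exact Or.inr ⟨e, List.mem_cons_self .., Or.inl rfl⟩
      · simp only [List.mem_append, List.mem_singleton] at h'
        rcases h' with h' | rfl
        · exact Or.inl (by rw [h3]; exact h')
        · exact Or.inr ⟨e, List.mem_cons_self .., Or.inr rfl⟩
      · exact Or.inl h'
    · exact Or.inr ⟨e', List.mem_cons_of_mem _ he', hw⟩

lemma pvAdjA_sub (edges : List (Int × Int)) (s v w : Int)
    (h : w ∈ (pvAdjA edges).getD v []) : w ∈ pvV edges s := by
  rcases pvAdjA_mem edges PySem.Dict.empty v w h with h' | ⟨e, he, hw⟩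
  · simp [PySem.Dict.getD_empty] at h'
  · simp only [pvV, List.mem_cons, List.mem_flatMap]
    exact Or.inr ⟨e, he, by rcases hw with hw | hw <;> simp [hw]⟩

-- B's inner fold (over any neighbour list) appends exactly the freshly visited vertices
lemma pvFoldB_spec :
    ∀ (ns acc : List Int) (vis : PySem.Set Int),
      ∃ nw, ns.foldl (fun (p : List Int × PySem.Set Int) w =>
          if w ∈ p.2 then p else (p.1 ++ [w], PySem.Set.add p.2 w)) (acc, vis)
        = (acc ++ nw, vis ++ nw) ∧
        (∀ x ∈ nw, x ∈ ns) ∧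
        (vis.Nodup → (vis ++ nw).Nodup) := by
  intro ns
  induction ns with
  | nil => exact fun acc vis => ⟨[], by simp⟩
  | cons n t ih =>
    intro acc vis
    by_cases hn : n ∈ vis
    · obtain ⟨nw, he, hsub, hnd⟩ := ih acc vis
      exact ⟨nw, by simpa [hn] using he, fun x hx => List.mem_cons_of_mem _ (hsub x hx), hnd⟩
    · have hadd : PySem.Set.add vis n = vis ++ [n] := by simp [PySem.Set.add, hn]
      obtain ⟨nw, he, hsub, hnd⟩ := ih (acc ++ [n]) (vis ++ [n])
      refine ⟨n :: nw, ?_, ?_, ?_⟩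
      · simpa [hn, hadd] using he
      · intro x hx
        rcases List.mem_cons.mp hx with rfl | hx
        · exact List.mem_cons_self ..
        · exact List.mem_cons_of_mem _ (hsub x hx)
      · intro hv
        have hvn : (vis ++ [n]).Nodup := by
          rw [List.nodup_append]
          refine ⟨hv, by simp, ?_⟩
          intro a ha b hb h
          subst h
          simp only [List.mem_singleton] at hb
          subst hb
          exact hn ha
        simpa using hnd hvn

lemma pvStep_spec (adj : PySem.Dict Int (List Int)) :
    ∀ (v : Int) (acc : List Int) (vis : PySem.Set Int),
      ∃ nw, pvStep adj (acc, vis) v = (acc ++ nw, vis ++ nw) ∧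
        (∀ x ∈ nw, x ∈ adj.getD v []) ∧
        (vis.Nodup → (vis ++ nw).Nodup) := by
  intro v acc vis
  exact pvFoldB_spec (adj.getD v []) acc vis

-- A's inner push-fold is the frontier fold with the queue prefix carried along and distances attached
lemma pvPush_bridge (d : Int) :
    ∀ (ns : List Int) (P : List (Int × Int)) (acc : List Int) (vis : PySem.Set Int),
      ns.foldl (fun (p : List (Int × Int) × PySem.Set Int) nb =>
          if nb ∈ p.2 then p else (p.1 ++ [(nb, d + 1)], PySem.Set.add p.2 nb))
        (P ++ acc.map (fun v => (v, d + 1)), vis)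
      = (P ++ (ns.foldl (fun (p : List Int × PySem.Set Int) w =>
            if w ∈ p.2 then p else (p.1 ++ [w], PySem.Set.add p.2 w)) (acc, vis)).1.map
              (fun v => (v, d + 1)),
         (ns.foldl (fun (p : List Int × PySem.Set Int) w =>
            if w ∈ p.2 then p else (p.1 ++ [w], PySem.Set.add p.2 w)) (acc, vis)).2) := by
  intro ns
  induction ns with
  | nil => intro P acc vis; rfl
  | cons n t ih =>
    intro P acc vis
    by_cases hn : n ∈ vis
    · simpa [hn] using ih P acc vis
    · have : P ++ acc.map (fun v => (v, d + 1)) ++ [(n, d + 1)]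
          = P ++ (acc ++ [n]).map (fun v => (v, d + 1)) := by
        simp
      simpa [hn, this] using ih P (acc ++ [n]) (PySem.Set.add vis n)

-- one iteration of A's while-loop on a non-final level
lemma pvALoop_step (adj : PySem.Dict Int (List Int)) (n : Int) (f : Nat) (v d : Int)
    (q : List (Int × Int)) (vis : PySem.Set Int) (res : List Int)
    (h1 : ¬ d = n) (h2 : d < n) :
    pvALoop adj n (f + 1) ((v, d) :: q) vis res
      = pvALoop adj n f
          ((adj.getD v []).foldl (fun (p : List (Int × Int) × PySem.Set Int) nb =>
             if nb ∈ p.2 then p else (p.1 ++ [(nb, d + 1)], PySem.Set.add p.2 nb)) (q, vis)).1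
          ((adj.getD v []).foldl (fun (p : List (Int × Int) × PySem.Set Int) nb =>
             if nb ∈ p.2 then p else (p.1 ++ [(nb, d + 1)], PySem.Set.add p.2 nb)) (q, vis)).2
          res := by
  rw [pvALoop, if_neg h1, if_pos h2]

-- last level: every queue element is at distance n; A just moves them to the result
lemma pvALoop_last (adj : PySem.Dict Int (List Int)) (n : Int) :
    ∀ (cur : List Int) (vis : PySem.Set Int) (res : List Int) (fuel : Nat),
      cur.length ≤ fuel →
      pvALoop adj n fuel (cur.map (fun v => (v, n))) vis res = res ++ cur := by
  intro cur
  induction cur with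
  | nil => intro vis res fuel _; cases fuel <;> simp [pvALoop]
  | cons c t ih =>
    intro vis res fuel hf
    obtain ⟨f, rfl⟩ : ∃ f, fuel = f + 1 := ⟨fuel - 1, by simp at hf; omega⟩
    show pvALoop adj n (f + 1) ((c, n) :: t.map (fun v => (v, n))) vis res = res ++ c :: t
    rw [pvALoop]
    simp only [lt_irrefl, if_false, if_true]
    rw [ih vis (res ++ [c]) f (by simp at hf ⊢; omega)]
    simp

-- main bridge: A's queue at levels n-(k+1) / n-k computes the remaining level rounds
lemma pvALoop_main (adj : PySem.Dict Int (List Int)) (n : Int) (V : List Int)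
    (hadj : ∀ v w, w ∈ adj.getD v [] → w ∈ V) :
    ∀ (k : Nat) (cur nxt : List Int) (vis : PySem.Set Int) (res : List Int) (fuel : Nat),
      vis.Nodup → (∀ x ∈ vis, x ∈ V) →
      cur.length + nxt.length + V.length ≤ fuel + vis.length →
      pvALoop adj n fuel
          (cur.map (fun v => (v, n - (k + 1))) ++ nxt.map (fun v => (v, n - k))) vis res
        = res ++ (pvLevels adj k (cur.foldl (pvStep adj) (nxt, vis)).1
                    (cur.foldl (pvStep adj) (nxt, vis)).2) := by
  have hlen : ∀ vis : PySem.Set Int, vis.Nodup → (∀ x ∈ vis, x ∈ V) → vis.length ≤ V.length := by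
    intro vis hnd hsub
    calc vis.length = vis.toFinset.card := (List.toFinset_card_of_nodup hnd).symm
      _ ≤ V.toFinset.card := Finset.card_le_card (fun x hx => by simpa using hsub x (by simpa using hx))
      _ ≤ V.length := V.toFinset_card_le
  intro k
  induction k with
  | zero =>
    intro cur
    induction cur with
    | nil =>
      intro nxt vis res fuel hnd hsub hfuel
      simp only [List.foldl_nil, pvLevels]
      have h0 : n - ((0 : Nat) : Int) = n := by simp
      rw [h0]
      exact pvALoop_last adj n nxt vis res fuel
        (by have := hlen vis hnd hsub; simp only [List.length_nil] at hfuel; omega)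
    | cons c t ih =>
      intro nxt vis res fuel hnd hsub hfuel
      obtain ⟨f, rfl⟩ : ∃ f, fuel = f + 1 :=
        ⟨fuel - 1, by
          have := hlen vis hnd hsub
          simp only [List.length_cons] at hfuel
          omega⟩
      show pvALoop adj n (f + 1)
          ((c, n - (((0 : Nat) : Int) + 1)) :: (t.map (fun v => (v, n - (((0 : Nat) : Int) + 1)))
            ++ nxt.map (fun v => (v, n - ((0 : Nat) : Int))))) vis res = _
      have hd : n - (((0 : Nat) : Int)) = (n - (((0 : Nat) : Int) + 1)) + 1 := by ring
      rw [hd, pvALoop_step adj n f c (n - (((0 : Nat) : Int) + 1)) _ vis res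
        (by push_cast; omega) (by push_cast; omega)]
      rw [pvPush_bridge (n - (((0 : Nat) : Int) + 1)) (adj.getD c [])
        (t.map (fun v => (v, n - (((0 : Nat) : Int) + 1)))) nxt vis]
      obtain ⟨nw, he, hw, hnd'⟩ := pvStep_spec adj c nxt vis
      have hstep : (adj.getD c []).foldl
          (fun (p : List Int × PySem.Set Int) w =>
            if w ∈ p.2 then p else (p.1 ++ [w], PySem.Set.add p.2 w)) (nxt, vis)
          = (nxt ++ nw, vis ++ nw) := he
      rw [hstep]
      have hih := ih (nxt ++ nw) (vis ++ nw) res f (hnd' hnd)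
        (fun x hx => by
          rcases List.mem_append.mp hx with hx | hx
          · exact hsub x hx
          · exact hadj c x (hw x hx))
        (by simp only [List.length_cons, List.length_append] at hfuel ⊢; omega)
      rw [hd] at hih
      rw [hih]
      have hpv : pvStep adj (nxt, vis) c = (nxt ++ nw, vis ++ nw) := he
      rw [show (c :: t).foldl (pvStep adj) (nxt, vis) = t.foldl (pvStep adj) (pvStep adj (nxt, vis) c) from List.foldl_cons .., hpv]
  | succ k' ihk =>
    intro cur
    induction cur with
    | nil =>
      intro nxt vis res fuel hnd hsub hfuel
      simp only [List.foldl_nil]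
      show _ = res ++ pvLevels adj (k' + 1) nxt vis
      by_cases hnil : nxt = []
      · subst hnil
        show pvALoop adj n fuel [] vis res = res ++ pvLevels adj (k' + 1) [] vis
        cases fuel <;> simp [pvALoop, pvLevels]
      have hrhs : pvLevels adj (k' + 1) nxt vis
          = pvLevels adj k' (nxt.foldl (pvStep adj) ([], vis)).1 (nxt.foldl (pvStep adj) ([], vis)).2 := by
        simp only [pvLevels, if_neg hnil]
      rw [hrhs]
      have := ihk nxt [] vis res fuel hnd hsub
        (by simp only [List.length_nil] at hfuel ⊢; omega)
      simpa using this
    | cons c t ih =>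
      intro nxt vis res fuel hnd hsub hfuel
      obtain ⟨f, rfl⟩ : ∃ f, fuel = f + 1 :=
        ⟨fuel - 1, by
          have := hlen vis hnd hsub
          simp only [List.length_cons] at hfuel
          omega⟩
      show pvALoop adj n (f + 1)
          ((c, n - (((k' + 1 : Nat) : Int) + 1)) :: (t.map (fun v => (v, n - (((k' + 1 : Nat) : Int) + 1)))
            ++ nxt.map (fun v => (v, n - ((k' + 1 : Nat) : Int))))) vis res = _
      have hd : n - (((k' + 1 : Nat) : Int)) = (n - (((k' + 1 : Nat) : Int) + 1)) + 1 := by ring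
      rw [hd, pvALoop_step adj n f c (n - (((k' + 1 : Nat) : Int) + 1)) _ vis res
        (by push_cast; omega) (by push_cast; omega)]
      rw [pvPush_bridge (n - (((k' + 1 : Nat) : Int) + 1)) (adj.getD c [])
        (t.map (fun v => (v, n - (((k' + 1 : Nat) : Int) + 1)))) nxt vis]
      obtain ⟨nw, he, hw, hnd'⟩ := pvStep_spec adj c nxt vis
      have hstep : (adj.getD c []).foldl
          (fun (p : List Int × PySem.Set Int) w =>
            if w ∈ p.2 then p else (p.1 ++ [w], PySem.Set.add p.2 w)) (nxt, vis)
          = (nxt ++ nw, vis ++ nw) := he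
      rw [hstep]
      have hih := ih (nxt ++ nw) (vis ++ nw) res f (hnd' hnd)
        (fun x hx => by
          rcases List.mem_append.mp hx with hx | hx
          · exact hsub x hx
          · exact hadj c x (hw x hx))
        (by simp only [List.length_cons, List.length_append] at hfuel ⊢; omega)
      rw [hd] at hih
      rw [hih]
      have hpv : pvStep adj (nxt, vis) c = (nxt ++ nw, vis ++ nw) := he
      rw [show (c :: t).foldl (pvStep adj) (nxt, vis) = t.foldl (pvStep adj) (pvStep adj (nxt, vis) c) from List.foldl_cons .., hpv]

-- ===== B-side bridge: pvWhileB computes pvLevels =====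

-- the adjacency list of v is exactly what B's edge rescan enumerates, in the same order
def pvNbrs (edges : List (Int × Int)) (v : Int) : List Int :=
  edges.flatMap (fun e => (if e.1 = v then [e.2] else []) ++ (if e.2 = v then [e.1] else []))

lemma pvAdjA_getD (edges : List (Int × Int)) (v : Int) :
    ∀ d : PySem.Dict Int (List Int),
      (edges.foldl (fun d e =>
        (d.modify e.1 [] (fun l => l ++ [e.2])).modify e.2 [] (fun l => l ++ [e.1])) d).getD v []
      = d.getD v [] ++ pvNbrs edges v := by
  induction edges with
  | nil => intro d; simp [pvNbrs]
  | cons e es ih =>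
    intro d
    rw [List.foldl_cons, ih]
    have h2 : ((d.modify e.1 [] (fun l => l ++ [e.2])).modify e.2 [] (fun l => l ++ [e.1])).getD v []
        = d.getD v [] ++ (if e.1 = v then [e.2] else []) ++ (if e.2 = v then [e.1] else []) := by
      simp only [PySem.Dict.getD_modify]
      have hsymm : ∀ a b : Int, ¬ a = b → ¬ b = a := fun a b h hh => h hh.symm
      by_cases hb : v = e.2 <;> by_cases ha : v = e.1
      · simp [← hb, ← ha]
      · simp [← hb, ha, hsymm _ _ ha]
      · simp [← ha, hb, hsymm _ _ hb]
      · simp [ha, hb, hsymm _ _ ha, hsymm _ _ hb]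
    rw [h2]
    simp [pvNbrs]

lemma pvAdjA_eq_nbrs (edges : List (Int × Int)) (v : Int) :
    (pvAdjA edges).getD v [] = pvNbrs edges v := by
  rw [pvAdjA, pvAdjA_getD]
  simp [PySem.Dict.getD_empty]

-- B's edge rescan is the one-step-per-neighbour fold over pvNbrs
lemma pvScan_eq (seen : List Int) (v : Int) :
    ∀ (edges : List (Int × Int)) (cur : List Int),
      pvScan edges seen cur v
        = (pvNbrs edges v).foldl
            (fun cur w => if w ∉ seen ∧ w ∉ cur then cur ++ [w] else cur) cur := by
  intro edges
  induction edges with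
  | nil => intro cur; simp [pvScan, pvNbrs]
  | cons e es ih =>
    intro cur
    have hcons : pvScan (e :: es) seen cur v
        = pvScan es seen
            (let c1 := if e.1 = v ∧ e.2 ∉ seen ∧ e.2 ∉ cur then cur ++ [e.2] else cur
             if e.2 = v ∧ e.1 ∉ seen ∧ e.1 ∉ c1 then c1 ++ [e.1] else c1) v := rfl
    have hnb : pvNbrs (e :: es) v
        = ((if e.1 = v then [e.2] else []) ++ (if e.2 = v then [e.1] else [])) ++ pvNbrs es v := by
      simp [pvNbrs]
    rw [hcons, ih, hnb, List.foldl_append]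
    congr 1
    rw [List.foldl_append]
    by_cases h1 : e.1 = v <;> by_cases h2 : e.2 = v <;>
      simp only [h1, h2, if_pos, List.foldl_cons, List.foldl_nil] <;>
      simp_all

-- one whole level: folding the frontier with pvStep from (cur, seen ++ cur) keeps the set equal
-- to seen ++ (the new-level accumulator), which B computes with pvScan
lemma pvLevelFold_eq (edges : List (Int × Int)) (seen : List Int) :
    ∀ (fr cur : List Int),
      fr.foldl (pvStep (pvAdjA edges)) (cur, seen ++ cur)
        = (fr.foldl (pvScan edges seen) cur,
           seen ++ fr.foldl (pvScan edges seen) cur) := by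
  have hone : ∀ (ns : List Int) (cur : List Int),
      ns.foldl (fun (p : List Int × PySem.Set Int) w =>
          if w ∈ p.2 then p else (p.1 ++ [w], PySem.Set.add p.2 w)) (cur, seen ++ cur)
        = (ns.foldl (fun cur w => if w ∉ seen ∧ w ∉ cur then cur ++ [w] else cur) cur,
           seen ++ ns.foldl (fun cur w => if w ∉ seen ∧ w ∉ cur then cur ++ [w] else cur) cur) := by
    intro ns
    induction ns with
    | nil => intro cur; rfl
    | cons w t ih =>
      intro cur
      by_cases hw : w ∈ seen ++ cur
      · have hnot : ¬ (w ∉ seen ∧ w ∉ cur) := by simp at hw ⊢; tauto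
        simpa [hw, hnot] using ih cur
      · have hyes : w ∉ seen ∧ w ∉ cur := by simp at hw ⊢; tauto
        have hadd : PySem.Set.add (seen ++ cur) w = seen ++ (cur ++ [w]) := by
          simp [PySem.Set.add, hw]
        simpa [hw, hyes, hadd] using ih (cur ++ [w])
  intro fr
  induction fr with
  | nil => intro cur; rfl
  | cons f t ih =>
    intro cur
    rw [List.foldl_cons, List.foldl_cons]
    have hstep : pvStep (pvAdjA edges) (cur, seen ++ cur) f
        = (pvScan edges seen cur f, seen ++ pvScan edges seen cur f) := by
      rw [pvStep, pvAdjA_eq_nbrs, hone, pvScan_eq]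
    rw [hstep, ih]

-- the whole while loop: last level of B's levels list = pvLevels on (last, flatten)
lemma pvWhileB_eq (edges : List (Int × Int)) :
    ∀ (k : Nat) (levels : List (List Int)),
      (pvWhileB edges k levels).getLastD []
        = pvLevels (pvAdjA edges) k (levels.getLastD []) (levels.flatMap id) := by
  intro k
  induction k with
  | zero => intro levels; rfl
  | succ r ih =>
    intro levels
    by_cases hnil : levels.getLastD [] = []
    · rw [pvWhileB, if_pos hnil, pvLevels, if_pos hnil, hnil]
    · rw [pvWhileB, if_neg hnil, pvLevels, if_neg hnil, ih]
      have hfold := pvLevelFold_eq edges (levels.flatMap id) (levels.getLastD []) []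
      rw [show (levels.flatMap id) ++ ([] : List Int) = levels.flatMap id by simp] at hfold
      rw [hfold]
      congr 1
      · simp
      · simp

-- ===== VERDICT (by name: the statement is the Claim_ definition above) =====
theorem vertices_n_edges_away_spec : Claim_equal_vertices_n_edges_away := by
  intro edges s n _
  show vertices_n_edges_away edges s n = vertices_n_edges_away_alt edges s n
  unfold vertices_n_edges_away vertices_n_edges_away_alt
  have hset : PySem.Set.ofList [s] = [s] := rfl
  rw [hset]
  by_cases hneg : n < 0
  · rw [if_pos hneg]
    obtain ⟨f, hf⟩ : ∃ f, 2 * edges.length + 1 = f + 1 := ⟨2 * edges.length, rfl⟩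
    rw [hf, pvALoop]
    rw [if_neg (by omega), if_neg (by omega)]
    cases f <;> simp [pvALoop]
  · rw [if_neg hneg]
    rw [pvWhileB_eq]
    have hlast : ([[s]] : List (List Int)).getLastD [] = [s] := rfl
    have hflat : ([[s]] : List (List Int)).flatMap id = [s] := rfl
    rw [hlast, hflat]
    have hVlen : (pvV edges s).length = 2 * edges.length + 1 := pvV_length edges s
    have hnd : ([s] : List Int).Nodup := by simp
    have hsub : ∀ x ∈ ([s] : List Int), x ∈ pvV edges s := by
      intro x hx; simp at hx; simp [pvV, hx]
    have hadj : ∀ v w, w ∈ (pvAdjA edges).getD v [] → w ∈ pvV edges s :=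
      fun v w h => pvAdjA_sub edges s v w h
    by_cases h0 : n = 0
    · subst h0
      have h1 : ([(s, (0:Int))]) = [s].map (fun v => (v, (0:Int))) := rfl
      rw [h1, pvALoop_last (pvAdjA edges) 0 [s] [s] [] (2 * edges.length + 1) (by simp)]
      rfl
    · obtain ⟨k, hk⟩ : ∃ k : Nat, ((k : Int) + 1) = n := ⟨(n - 1).toNat, by omega⟩
      have hmain := pvALoop_main (pvAdjA edges) n (pvV edges s) hadj k [s] [] [s] []
        (2 * edges.length + 1) hnd hsub (by simp [hVlen]; omega)
      have hq : ([s].map (fun v => (v, n - ((k : Nat) + 1))) ++ ([] : List Int).map (fun v => (v, n - (k : Nat))))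
          = [(s, 0)] := by
        have : n - (((k : Nat) : Int) + 1) = 0 := by omega
        simp [this]
      rw [hq] at hmain
      rw [hmain]
      have htn : n.toNat = k + 1 := by omega
      rw [htn]
      show pvLevels (pvAdjA edges) (k + 1) [s] [s]
          = pvLevels (pvAdjA edges) (k + 1) [s] [s]
      rfl
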